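-- pv_equiv track=rewrite | github.com/americaneaglelogsvc/RideShare | scripts/agentic_scan_runner.py | status_from_evidence
-- ===== SOURCE A (Python) =====
-- def status_from_evidence(ev_list):
--   if any(e.startswith("test:") for e in ev_list):
--     return "Tested"
--   if any(e.startswith(("code:","ui:","db:")) for e in ev_list):
--     return "Implemented"
--   if ev_list:
--     return "In Progress"
--   return "Not Started"
-- ===== SOURCE B (Python) =====
-- def _rank(e):
--   if e.startswith("test:"):
--     return 3
--   if e.startswith(("code:", "ui:", "db:")):
--     return 2
--   return 1
--
-- _STATUSES = ("Not Started", "In Progress", "Implemented", "Tested")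
--
-- def status_from_evidence(ev_list):
--   return _STATUSES[max((_rank(e) for e in ev_list), default=0)]
-- ===== Notes on version B (the rewrite author's own statement) =====
-- stated objective: alternative
-- what changed: Replaces A's prioritized short-circuit scans with a rank maximization: each evidence string is mapped to a numeric rank (test:3, code/ui/db:2, other:1), and the status is looked up in a table indexed by the maximum rank (0 for an empty list).
import Mathlib
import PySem

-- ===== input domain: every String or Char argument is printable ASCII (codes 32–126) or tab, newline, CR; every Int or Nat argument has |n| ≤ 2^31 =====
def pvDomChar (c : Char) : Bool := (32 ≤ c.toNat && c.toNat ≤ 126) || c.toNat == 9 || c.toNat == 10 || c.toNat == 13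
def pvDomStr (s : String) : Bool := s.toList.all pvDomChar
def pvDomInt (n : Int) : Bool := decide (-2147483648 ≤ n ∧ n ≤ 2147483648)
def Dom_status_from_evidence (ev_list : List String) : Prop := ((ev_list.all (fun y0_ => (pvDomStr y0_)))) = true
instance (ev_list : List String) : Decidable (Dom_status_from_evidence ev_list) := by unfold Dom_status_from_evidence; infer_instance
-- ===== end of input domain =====

-- B: rank maximization with a table lookup instead of A's prioritized short-circuit scans; equal return value on all inputs (alternative decomposition, no speed claim).
-- ===== PORT A =====
def status_from_evidence (ev_list : List String) : String :=
  if ev_list.any (fun e => PySem.Str.startswith e "test:") then "Tested"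
  else if ev_list.any (fun e => PySem.Str.startswith e "code:" || PySem.Str.startswith e "ui:" || PySem.Str.startswith e "db:") then "Implemented"
  else if !ev_list.isEmpty then "In Progress"
  else "Not Started"

-- ===== PORT B =====
def pvRank (e : String) : Int :=
  if PySem.Str.startswith e "test:" then 3
  else if PySem.Str.startswith e "code:" || PySem.Str.startswith e "ui:" || PySem.Str.startswith e "db:" then 2
  else 1

def pvStatuses : List String := ["Not Started", "In Progress", "Implemented", "Tested"]

def status_from_evidence_alt (ev_list : List String) : String :=
  -- max(gen, default=0) → max? with .getD 0; tuple indexing → pyGet? (always in range here)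
  let m := (PySem.List.max? (ev_list.map pvRank) (fun y => y)).getD 0
  (PySem.List.pyGet? pvStatuses m).getD ""

-- ===== PRECONDITION & SPEC =====
def Spec_status_from_evidence (ev_list : List String) (out : String) : Prop := out = status_from_evidence_alt ev_list
instance (ev_list : List String) (out : String) : Decidable (Spec_status_from_evidence ev_list out) := by unfold Spec_status_from_evidence; infer_instance

-- ===== CLAIM (what is proved, stated in full; the proofs are below) =====
def Claim_equal_status_from_evidence : Prop := ∀ (ev_list : List String), Dom_status_from_evidence ev_list → Spec_status_from_evidence ev_list (status_from_evidence ev_list)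

-- ===== LEMMAS AND PROOFS =====
theorem pvFoldRank (t : List String) : ∀ (a : Int),
    (t.map pvRank).foldl max a =
      if t.any (fun e => PySem.Str.startswith e "test:") then max a 3
      else if t.any (fun e => PySem.Str.startswith e "code:" || PySem.Str.startswith e "ui:" || PySem.Str.startswith e "db:") then max a 2
      else if t.isEmpty then a else max a 1 := by
  induction t with
  | nil => simp
  | cons x xs ih =>
    intro a
    rw [List.map_cons, List.foldl_cons, ih]
    simp only [List.any_cons, List.isEmpty_cons, pvRank]
    cases h1 : PySem.Str.startswith x "test:" <;>
      cases h2 : PySem.Str.startswith x "code:" || PySem.Str.startswith x "ui:" || PySem.Str.startswith x "db:" <;>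
      cases hT : xs.any (fun e => PySem.Str.startswith e "test:") <;>
      cases hI : xs.any (fun e => PySem.Str.startswith e "code:" || PySem.Str.startswith e "ui:" || PySem.Str.startswith e "db:") <;>
      cases hE : xs.isEmpty <;>
      simp [max_def] <;> split_ifs <;> omega

theorem pvRankChar (ev : List String) :
    (PySem.List.max? (ev.map pvRank) (fun y => y)).getD 0 =
      if ev.any (fun e => PySem.Str.startswith e "test:") then 3
      else if ev.any (fun e => PySem.Str.startswith e "code:" || PySem.Str.startswith e "ui:" || PySem.Str.startswith e "db:") then 2
      else if ev.isEmpty then 0 else 1 := by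
  cases ev with
  | nil => simp [PySem.List.max?]
  | cons x xs =>
    rw [List.map_cons, PySem.List.max?_id_cons, Option.getD_some, pvFoldRank]
    simp only [List.any_cons, List.isEmpty_cons, pvRank]
    cases h1 : PySem.Str.startswith x "test:" <;>
      cases h2 : PySem.Str.startswith x "code:" || PySem.Str.startswith x "ui:" || PySem.Str.startswith x "db:" <;>
      cases hT : xs.any (fun e => PySem.Str.startswith e "test:") <;>
      cases hI : xs.any (fun e => PySem.Str.startswith e "code:" || PySem.Str.startswith e "ui:" || PySem.Str.startswith e "db:") <;>
      simp

-- ===== VERDICT (by name: the statement is the Claim_ definition above) =====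
theorem status_from_evidence_spec : Claim_equal_status_from_evidence := by
  intro ev _
  unfold Spec_status_from_evidence status_from_evidence status_from_evidence_alt
  rw [pvRankChar]
  cases h1 : ev.any (fun e => PySem.Str.startswith e "test:") <;>
    cases h2 : ev.any (fun e => PySem.Str.startswith e "code:" || PySem.Str.startswith e "ui:" || PySem.Str.startswith e "db:") <;>
    cases h3 : ev.isEmpty <;>
    simp only [Bool.not_true, Bool.not_false] <;> rfl
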